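-- pv_equiv track=rewrite | github.com/NBCLab/arithmetic-task | create_subject_trials.py | get_hist
-- ===== SOURCE A (Python) =====
-- from collections import Counter
--
-- def get_hist(vals, value_range):
--     counter = Counter(vals)
--     for v in value_range:
--         if v not in counter.keys():
--             counter[v] = 0
--     x = sorted(counter.keys())
--     y = [counter[x_val] for x_val in x]
--     return x, y
-- ===== SOURCE B (Python) =====
-- def get_hist(vals, value_range):
--     # Sort-and-merge counting: counts are run lengths in sorted(vals), read off
--     # by a single advancing pointer while walking the sorted set-union of keys.
--     sv = sorted(vals)
--     xs = sorted(set(vals).union(value_range))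
--     i = 0
--     y = []
--     for v in xs:
--         j = i
--         while j < len(sv) and sv[j] == v:
--             j += 1
--         y.append(j - i)
--         i = j
--     return xs, y
-- ===== Notes on version B (the rewrite author's own statement) =====
-- stated objective: alternative
-- what changed: Replaced the Counter hash accumulation plus explicit zero-fill loop over value_range by sort-and-merge counting: vals is sorted and each key's count is read off as a run length with one advancing pointer while walking the sorted set-union of keys; no dict is built.
import Mathlib
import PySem

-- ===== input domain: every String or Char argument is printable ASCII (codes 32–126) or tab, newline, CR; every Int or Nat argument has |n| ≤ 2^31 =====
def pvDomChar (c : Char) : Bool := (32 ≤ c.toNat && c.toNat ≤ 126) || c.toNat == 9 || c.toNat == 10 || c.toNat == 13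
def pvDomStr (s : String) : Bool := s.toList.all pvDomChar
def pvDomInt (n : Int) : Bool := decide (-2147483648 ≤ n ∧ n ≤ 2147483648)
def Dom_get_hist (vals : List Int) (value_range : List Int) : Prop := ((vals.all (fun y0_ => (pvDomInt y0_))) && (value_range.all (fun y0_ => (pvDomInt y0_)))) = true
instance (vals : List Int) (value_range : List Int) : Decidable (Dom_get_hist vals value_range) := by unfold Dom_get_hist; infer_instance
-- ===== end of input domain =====

-- B replaces A's Counter + zero-fill loop by sort-and-merge run-length counting over the sorted key union (objective: alternative).


-- ===== PORT A =====
def get_hist (vals : List Int) (value_range : List Int) : List Int × List Int :=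
  let counter : PySem.Dict Int Int := PySem.Dict.counter vals
  let counter := value_range.foldl
    (fun d v => if d.contains v then d else d.insert v 0) counter
  let x := PySem.List.sorted counter.keys (fun k => k) false
  let y := x.map (fun x_val => counter.getD x_val 0)
  (x, y)

-- ===== PORT B =====
-- the inner 'while j < len(sv) and sv[j] == v: j += 1' as the number of steps taken from j
def runLen (sv : List Int) (v : Int) (j : Nat) : Nat :=
  if h : j < sv.length then
    if sv[j] = v then runLen sv v (j + 1) + 1 else 0
  else 0
termination_by sv.length - j

def get_hist_alt (vals : List Int) (value_range : List Int) : List Int × List Int :=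
  let sv := PySem.List.sorted vals (fun k => k) false
  let xs := PySem.List.sorted
    (PySem.Set.union (PySem.Set.ofList vals) value_range) (fun k => k) false
  let res := xs.foldl (fun s v =>
      let j := s.1 + runLen sv v s.1
      (j, s.2 ++ [(j : Int) - (s.1 : Int)])) ((0 : Nat), ([] : List Int))
  (xs, res.2)

-- ===== PRECONDITION & SPEC =====
def Spec_get_hist (vals : List Int) (value_range : List Int) (out : List Int × List Int) : Prop := out = get_hist_alt vals value_range
instance (vals : List Int) (value_range : List Int) (out : List Int × List Int) : Decidable (Spec_get_hist vals value_range out) := by unfold Spec_get_hist; infer_instance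

-- ===== CLAIM (what is proved, stated in full; the proofs are below) =====
def Claim_equal_get_hist : Prop := ∀ (vals : List Int) (value_range : List Int), Dom_get_hist vals value_range → Spec_get_hist vals value_range (get_hist vals value_range)

-- ===== LEMMAS AND PROOFS =====

-- A-side: the zero-fill loop never changes any lookup with default 0.
lemma getD_fill_zero (l : List Int) (d : PySem.Dict Int Int) (k : Int) :
    (l.foldl (fun d v => if d.contains v then d else d.insert v 0) d).getD k 0
      = d.getD k 0 := by
  induction l generalizing d with
  | nil => rfl
  | cons v t ih =>
    simp only [List.foldl_cons]
    by_cases h : d.contains v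
    · simp [h, ih]
    · rw [if_neg h, ih, PySem.Dict.getD_insert]
      by_cases hk : k = v
      · subst hk
        rw [if_pos rfl, PySem.Dict.getD_of_not_contains d 0 (show d.contains k = false by simpa using h)]
      · rw [if_neg hk]

-- A-side: keys after the zero-fill loop are the original keys plus the filled values.
lemma mem_keys_fill (l : List Int) (d : PySem.Dict Int Int) (k : Int) :
    k ∈ (l.foldl (fun d v => if d.contains v then d else d.insert v 0) d).keys
      ↔ k ∈ d.keys ∨ k ∈ l := by
  induction l generalizing d with
  | nil => simp
  | cons v t ih =>
    simp only [List.foldl_cons]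
    by_cases h : d.contains v
    · rw [if_pos h, ih]
      constructor
      · rintro (hd | ht)
        · exact Or.inl hd
        · exact Or.inr (List.mem_cons_of_mem _ ht)
      · rintro (hd | hvt)
        · exact Or.inl hd
        · rcases List.mem_cons.mp hvt with rfl | ht
          · exact Or.inl ((PySem.Dict.contains_iff_mem_keys d k).mp h)
          · exact Or.inr ht
    · rw [if_neg h, ih]
      simp only [PySem.Dict.mem_keys_insert, List.mem_cons]
      tauto

-- A-side: nodup keys survive the zero-fill loop.
lemma nodup_keys_fill (l : List Int) (d : PySem.Dict Int Int) (h : d.keys.Nodup) :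
    (l.foldl (fun d v => if d.contains v then d else d.insert v 0) d).keys.Nodup := by
  induction l generalizing d with
  | nil => exact h
  | cons v t ih =>
    simp only [List.foldl_cons]
    by_cases hc : d.contains v
    · rw [if_pos hc]; exact ih d h
    · rw [if_neg hc]
      exact ih _ (PySem.Dict.nodup_keys_insert _ _ _ h)

-- B-side: shifting the scan index over a cons cell.
lemma runLen_cons (a v : Int) (t : List Int) (j : Nat) :
    runLen (a :: t) v (j + 1) = runLen t v j := by
  have H : ∀ n j, t.length - j ≤ n → runLen (a :: t) v (j + 1) = runLen t v j := by
    intro n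
    induction n with
    | zero =>
      intro j hj
      have h : ¬ j < t.length := by omega
      have h' : ¬ j + 1 < (a :: t).length := by simp; omega
      conv_lhs => rw [runLen]
      conv_rhs => rw [runLen]
      rw [dif_neg h', dif_neg h]
    | succ n ih =>
      intro j hj
      conv_lhs => rw [runLen]
      conv_rhs => rw [runLen]
      by_cases h : j < t.length
      · have h' : j + 1 < (a :: t).length := by simp; omega
        rw [dif_pos h', dif_pos h]
        have hg : (a :: t)[j + 1] = t[j] := by simp
        rw [hg]
        by_cases he : t[j] = v
        · rw [if_pos he, if_pos he, ih (j + 1) (by omega)]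
        · rw [if_neg he, if_neg he]
      · have h' : ¬ j + 1 < (a :: t).length := by simp; omega
        rw [dif_neg h', dif_neg h]
  exact H t.length j (by omega)

-- counting split: #(≤ v) = #(< v) + #(= v), on any list.
lemma countP_le_split (sv : List Int) (v : Int) :
    sv.countP (fun a => a ≤ v) = sv.countP (fun a => a < v) + sv.count v := by
  induction sv with
  | nil => simp
  | cons a t ih =>
    by_cases h1 : a ≤ v <;> by_cases h2 : a < v <;> by_cases h3 : a = v <;>
      simp [ih, h1, h2, h3] <;> omega

-- B-side: the run length at the boundary of the < v prefix of a sorted list is the count of v.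
lemma runLen_eq_count (sv : List Int) (v : Int) (hs : sv.Pairwise (· ≤ ·)) :
    runLen sv v (sv.countP (fun a => a < v)) = sv.count v := by
  induction sv with
  | nil => rw [runLen]; simp
  | cons a t ih =>
    have hat : ∀ b ∈ t, a ≤ b := fun b hb => (List.pairwise_cons.mp hs).1 b hb
    have ht : t.Pairwise (· ≤ ·) := (List.pairwise_cons.mp hs).2
    by_cases hlt : a < v
    · have : (a :: t).countP (fun a => a < v) = t.countP (fun a => a < v) + 1 := by
        simp [hlt]
      rw [this, runLen_cons, ih ht, List.count_cons]
      have : ¬ a = v := by omega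
      simp [this]
    · have hz : (a :: t).countP (fun a => a < v) = 0 := by
        rw [List.countP_eq_zero]
        intro b hb
        rcases List.mem_cons.mp hb with rfl | hbt
        · simpa using hlt
        · have := hat b hbt
          simp; omega
      rw [hz, runLen]
      have hlen : 0 < (a :: t).length := by simp
      rw [dif_pos hlen]
      by_cases hav : a = v
      · rw [if_pos (by simpa using hav)]
        have htz : t.countP (fun a => a < v) = 0 := by
          rw [List.countP_eq_zero]
          intro b hb
          have := hat b hb
          simp; omega
        have : runLen (a :: t) v 1 = runLen t v 0 := runLen_cons a v t 0
        rw [this, ← htz, ih ht, List.count_cons]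
        simp [hav]
      · rw [if_neg (by simpa using hav)]
        have : (a :: t).count v = 0 := by
          rw [List.count_eq_zero]
          intro hmem
          rcases List.mem_cons.mp hmem with rfl | hvt
          · exact hav rfl
          · have := hat v hvt
            omega
        omega

-- B-side: the merge loop over a strictly increasing key list xs covering sv produces the counts.
lemma fold_runs (xs : List Int) : ∀ (sv : List Int) (i : Nat) (acc : List Int),
    sv.Pairwise (· ≤ ·) → xs.Pairwise (· < ·) →
    (∀ v, xs.head? = some v → i = sv.countP (fun a => a < v) ∧ ∀ a ∈ sv, v ≤ a → a ∈ xs) →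
    (xs.foldl (fun s v =>
        (s.1 + runLen sv v s.1, s.2 ++ [((s.1 + runLen sv v s.1 : Nat) : Int) - (s.1 : Int)])) (i, acc)).2
      = acc ++ xs.map (fun v => (sv.count v : Int)) := by
  induction xs with
  | nil => intro sv i acc _ _ _; simp
  | cons v rest ih =>
    intro sv i acc hsv hxs hh
    obtain ⟨hi, hcov⟩ := hh v rfl
    have hrun : runLen sv v i = sv.count v := by rw [hi]; exact runLen_eq_count sv v hsv
    have hrest : rest.Pairwise (· < ·) := (List.pairwise_cons.mp hxs).2
    have hvr : ∀ b ∈ rest, v < b := (List.pairwise_cons.mp hxs).1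
    simp only [List.foldl_cons]
    have hval : ((i + runLen sv v i : Nat) : Int) - (i : Int) = (sv.count v : Int) := by
      rw [hrun]; push_cast; ring
    rw [ih sv (i + runLen sv v i) (acc ++ [((i + runLen sv v i : Nat) : Int) - (i : Int)]) hsv hrest ?_]
    · rw [hval, List.map_cons, List.append_assoc, List.singleton_append]
    · intro v' hv'
      obtain ⟨rest', hr⟩ : ∃ rest', rest = v' :: rest' := by
        cases rest with
        | nil => simp at hv'
        | cons b rb => simp at hv'; exact ⟨rb, by rw [hv']⟩
      have hvv' : v < v' := hvr v' (by rw [hr]; exact List.mem_cons_self)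
      have hrge : ∀ b ∈ rest, v' ≤ b := by
        intro b hb
        rw [hr] at hb
        rcases List.mem_cons.mp hb with rfl | hb'
        · exact le_refl _
        · exact le_of_lt ((List.pairwise_cons.mp (hr ▸ hrest)).1 b hb')
      constructor
      · -- i + run = countP (< v')
        rw [hrun, hi, ← countP_le_split]
        refine List.countP_congr (fun a ha => ?_)
        simp only [decide_eq_true_eq]
        constructor
        · intro h; omega
        · intro h
          by_contra hle
          have hva : v < a := by omega
          have : a ∈ v :: rest := hcov a ha (le_of_lt hva)
          rcases List.mem_cons.mp this with rfl | hmem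
          · omega
          · have := hrge a hmem; omega
      · intro a ha hle
        have : a ∈ v :: rest := hcov a ha (by omega)
        rcases List.mem_cons.mp this with rfl | hmem
        · omega
        · exact hmem

theorem get_hist_spec : Claim_equal_get_hist := by
  intro vals value_range _
  unfold Spec_get_hist get_hist get_hist_alt
  simp only
  set d := value_range.foldl (fun d v => if d.contains v then d else d.insert v 0)
    (PySem.Dict.counter vals) with hd
  set sv := PySem.List.sorted vals (fun k => k) false with hsv
  set xs := PySem.List.sorted
    (PySem.Set.union (PySem.Set.ofList vals) value_range) (fun k => k) false with hxs
  -- the x components agree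
  have hkeys : ∀ k, k ∈ d.keys ↔ k ∈ PySem.Set.union (PySem.Set.ofList vals) value_range := by
    intro k
    rw [hd, mem_keys_fill, PySem.Dict.keys_counter]
    simp [PySem.Set.mem_union, PySem.Set.mem_ofList]
  have hnd : d.keys.Nodup := nodup_keys_fill _ _ (PySem.Dict.nodup_keys_counter vals)
  have hndu : (PySem.Set.union (PySem.Set.ofList vals) value_range).Nodup :=
    PySem.Set.nodup_union _ _ (PySem.Set.nodup_ofList vals)
  have hperm : d.keys.Perm (PySem.Set.union (PySem.Set.ofList vals) value_range) :=
    (List.perm_ext_iff_of_nodup hnd hndu).mpr hkeys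
  have hx : PySem.List.sorted d.keys (fun k => k) false = xs :=
    PySem.List.sorted_eq_sorted_of_perm _ _ _ (fun a b h => h) hperm
  rw [hx]
  -- properties of sv and xs
  have hsvs : sv.Pairwise (· ≤ ·) := by
    have := PySem.List.sorted_pairwise vals (fun k => k)
    simpa using this
  have hsvp : sv.Perm vals := PySem.List.sorted_perm vals _ false
  have hxnd : xs.Nodup :=
    ((PySem.List.sorted_perm _ _ false).nodup_iff).mpr hndu
  have hxle : xs.Pairwise (· ≤ ·) := by
    have := PySem.List.sorted_pairwise (PySem.Set.union (PySem.Set.ofList vals) value_range) (fun k => k)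
    simpa using this
  have hxlt : xs.Pairwise (· < ·) := by
    have := hxle.and (List.nodup_iff_pairwise_ne.mp hxnd)
    exact this.imp (fun h => lt_of_le_of_ne h.1 h.2)
  have hmemxs : ∀ a ∈ sv, a ∈ xs := by
    intro a ha
    rw [hxs, PySem.List.mem_sorted, PySem.Set.mem_union, PySem.Set.mem_ofList]
    exact Or.inl (hsvp.mem_iff.mp ha)
  -- the y components agree
  have hy : (xs.foldl (fun s v =>
        (s.1 + runLen sv v s.1, s.2 ++ [((s.1 + runLen sv v s.1 : Nat) : Int) - (s.1 : Int)]))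
        ((0 : Nat), ([] : List Int))).2
      = xs.map (fun v => (sv.count v : Int)) := by
    have := fold_runs xs sv 0 [] hsvs hxlt ?_
    · simpa using this
    · intro v hv
      refine ⟨?_, fun a ha _ => hmemxs a ha⟩
      obtain ⟨t, hxt⟩ : ∃ t, xs = v :: t := by
        cases hq : xs with
        | nil => rw [hq] at hv; simp at hv
        | cons b tb =>
          rw [hq] at hv
          simp at hv
          exact ⟨tb, by rw [hv]⟩
      have hhead : ∀ b ∈ xs, v ≤ b := by
        intro b hb
        rw [hxt] at hb
        rcases List.mem_cons.mp hb with rfl | hbt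
        · exact le_refl _
        · exact le_of_lt ((List.pairwise_cons.mp (hxt ▸ hxlt)).1 b hbt)
      symm
      rw [List.countP_eq_zero]
      intro a ha
      have := hhead a (hmemxs a ha)
      simp; omega
  refine Prod.ext rfl ?_
  simp only
  rw [hy]
  refine List.map_congr_left (fun k _ => ?_)
  rw [hd, getD_fill_zero, PySem.Dict.getD_counter, hsvp.count_eq]
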